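-- pv_equiv track=rewrite | github.com/zhongzhouTan-coder/benchmark | ais_bench/benchmark/openicl/icl_evaluator/icl_leval_evaluator.py | _extract_loyalty_from_prediction
-- ===== SOURCE A (Python) =====
-- def _extract_loyalty_from_prediction(response: str) -> str:
--     """Extract 'true'/'false' from the loyalty segment of the response.
--
--     We treat everything before "[fact:" as the loyalty segment if present;
--     otherwise, the whole response is scanned. Returns 'true'/'false' or
--     '<error>' if not found.
--     """
--     text = (response or '').lower()
--     if "[fact:" in text:
--         loyalty = text.split("[fact:", 1)[0]
--     else:
--         loyalty = text
--
--     # Prefer exact 'true'/'false' first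
--     for word in loyalty.split():
--         w = word.strip().lower().strip('.,;:!')
--         if w == 'true':
--             return 'true'
--         if w == 'false':
--             return 'false'
--     # Then fallback to substring contains (to allow TRUE/FALSE inside punctuation)
--     for word in loyalty.split():
--         w = word.lower()
--         if 'true' in w:
--             return 'true'
--         if 'false' in w:
--             return 'false'
--     return "<error>"
-- ===== SOURCE B (Python) =====
-- def _extract_loyalty_from_prediction(response: str) -> str:
--     """Single pass: return on exact 'true'/'false'; remember first substring hit as fallback."""
--     text = (response or '').lower()
--     loyalty = text.split("[fact:", 1)[0] if "[fact:" in text else text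
--     fallback = None
--     for word in loyalty.split():
--         w = word.strip().lower().strip('.,;:!')
--         if w == 'true':
--             return 'true'
--         if w == 'false':
--             return 'false'
--         if fallback is None:
--             lw = word.lower()
--             if 'true' in lw:
--                 fallback = 'true'
--             elif 'false' in lw:
--                 fallback = 'false'
--     return fallback if fallback is not None else "<error>"
-- ===== Notes on version B (the rewrite author's own statement) =====
-- stated objective: alternative
-- what changed: Replaces A's two sequential passes over the words (exact match pass, then substring pass) with a single pass that returns immediately on an exact match and records the first substring hit as a pending fallback.
import Mathlib
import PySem

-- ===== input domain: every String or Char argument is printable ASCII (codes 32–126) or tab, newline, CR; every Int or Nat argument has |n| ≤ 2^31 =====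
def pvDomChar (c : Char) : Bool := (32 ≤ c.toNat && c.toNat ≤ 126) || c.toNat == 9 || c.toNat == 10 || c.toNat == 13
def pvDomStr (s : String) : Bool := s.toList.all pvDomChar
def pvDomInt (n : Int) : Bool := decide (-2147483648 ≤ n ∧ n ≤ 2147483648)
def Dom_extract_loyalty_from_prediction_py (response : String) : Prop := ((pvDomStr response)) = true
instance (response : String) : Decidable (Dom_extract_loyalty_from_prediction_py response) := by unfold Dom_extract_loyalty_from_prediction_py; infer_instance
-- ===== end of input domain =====

-- B collapses A's two word passes into one pass with a first-seen fallback accumulator (objective: alternative).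

-- ===== PORT A =====
-- the shared segmenting: (response or '').lower(), cut before "[fact:" if present
def pvLoyaltySeg (response : String) : String :=
  let text := PySem.Str.lower response
  if PySem.Str.isIn "[fact:" text then
    ((PySem.Str.splitMax? text "[fact:" 1).getD []).headD ""
  else text

-- first for-loop of A: exact match after strip/lower/strip('.,;:!')
def pvLoopA1 : List String → Option String
  | [] => none
  | word :: rest =>
    let w := PySem.Str.stripChars (PySem.Str.lower (PySem.Str.strip word)) ".,;:!"
    if w = "true" then some "true"
    else if w = "false" then some "false"
    else pvLoopA1 rest

-- second for-loop of A: substring fallback on word.lower()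
def pvLoopA2 : List String → Option String
  | [] => none
  | word :: rest =>
    let w := PySem.Str.lower word
    if PySem.Str.isIn "true" w then some "true"
    else if PySem.Str.isIn "false" w then some "false"
    else pvLoopA2 rest

def extract_loyalty_from_prediction_py (response : String) : String :=
  let words := PySem.Str.split₀ (pvLoyaltySeg response)
  match pvLoopA1 words with
  | some r => r
  | none =>
    match pvLoopA2 words with
    | some r => r
    | none => "<error>"

-- ===== PORT B =====
-- single loop of B: early return on exact match, first substring hit kept as fallback
def pvLoopB : List String → Option String → String
  | [], fb => fb.getD "<error>"
  | word :: rest, fb =>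
    let w := PySem.Str.stripChars (PySem.Str.lower (PySem.Str.strip word)) ".,;:!"
    if w = "true" then "true"
    else if w = "false" then "false"
    else
      let fb' :=
        match fb with
        | some r => some r
        | none =>
          let lw := PySem.Str.lower word
          if PySem.Str.isIn "true" lw then some "true"
          else if PySem.Str.isIn "false" lw then some "false"
          else none
      pvLoopB rest fb'

def extract_loyalty_from_prediction_py_alt (response : String) : String :=
  pvLoopB (PySem.Str.split₀ (pvLoyaltySeg response)) none

-- ===== PRECONDITION & SPEC =====
def Spec_extract_loyalty_from_prediction_py (response : String) (out : String) : Prop := out = extract_loyalty_from_prediction_py_alt response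
instance (response : String) (out : String) : Decidable (Spec_extract_loyalty_from_prediction_py response out) := by unfold Spec_extract_loyalty_from_prediction_py; infer_instance

-- ===== CLAIM (what is proved, stated in full; the proofs are below) =====
def Claim_equal_extract_loyalty_from_prediction_py : Prop := ∀ (response : String), Dom_extract_loyalty_from_prediction_py response → Spec_extract_loyalty_from_prediction_py response (extract_loyalty_from_prediction_py response)

-- ===== LEMMAS AND PROOFS =====
-- one-pass loop = pass1, else fallback-then-pass2
theorem pvLoopB_eq (words : List String) (fb : Option String) :
    pvLoopB words fb =
      match pvLoopA1 words with
      | some r => r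
      | none =>
        match fb with
        | some r => r
        | none =>
          match pvLoopA2 words with
          | some r => r
          | none => "<error>" := by
  induction words generalizing fb with
  | nil => cases fb <;> simp [pvLoopB, pvLoopA1, pvLoopA2, Option.getD]
  | cons word rest ih =>
    simp only [pvLoopB, pvLoopA1, pvLoopA2]
    by_cases h1 : PySem.Str.stripChars (PySem.Str.lower (PySem.Str.strip word)) ".,;:!" = "true"
    · simp [h1]
    · by_cases h2 : PySem.Str.stripChars (PySem.Str.lower (PySem.Str.strip word)) ".,;:!" = "false"
      · simp [h2]
      · simp only [if_neg h1, if_neg h2]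
        rw [ih]
        cases pvLoopA1 rest <;> cases fb <;> split_ifs <;> rfl

-- ===== VERDICT (by name: the statement is the Claim_ definition above) =====
theorem extract_loyalty_from_prediction_py_spec : Claim_equal_extract_loyalty_from_prediction_py := by
  intro response _
  unfold Spec_extract_loyalty_from_prediction_py
  unfold extract_loyalty_from_prediction_py extract_loyalty_from_prediction_py_alt
  rw [pvLoopB_eq]
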